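-- pv_equiv track=rewrite | github.com/seemaullal/advent-of-code | 2025/04/solution.py | part_2
-- ===== SOURCE A (Python) =====
-- DIRECTIONS = ((-1, 0), (1, 0), (0, -1), (0, 1), (-1, -1), (-1, 1), (1, -1), (1, 1))
--
-- def part_2(grid):
--     result = 0
--     while True:
--         changed = False
--         for row_num in range(len(grid)):
--             for col_num in range(len(grid[0])):
--                 if grid[row_num][col_num] != "@":
--                     continue
--                 num_towels = 0
--                 for row_d, col_d in DIRECTIONS:
--                     to_check_row = row_num + row_d
--                     to_check_col = col_num + col_d
--                     if 0 <= to_check_row < len(grid) and 0 <= to_check_col < len(grid[0]):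
--                         if grid[to_check_row][to_check_col] == "@":
--                             num_towels += 1
--                 if num_towels < 4:
--                     changed = True
--                     result += 1
--                     grid[row_num][col_num] = '.'
--         if not changed:
--             break
--     return result
-- ===== SOURCE B (Python) =====
-- DIRECTIONS = ((-1, 0), (1, 0), (0, -1), (0, 1), (-1, -1), (-1, 1), (1, -1), (1, 1))
--
-- def part_2(grid):
--     # Worklist peeling over a coordinate set; does not mutate grid (A does). Alternative exact algorithm.
--     rows = len(grid)
--     cols = len(grid[0]) if grid else 0
--     alive = {(r, c) for r in range(rows) for c in range(cols) if grid[r][c] == "@"}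
--
--     def degree(p):
--         return sum(1 for dr, dc in DIRECTIONS if (p[0] + dr, p[1] + dc) in alive)
--
--     stack = [p for p in alive if degree(p) < 4]
--     removed = 0
--     while stack:
--         p = stack.pop()
--         if p not in alive:
--             continue
--         alive.remove(p)
--         removed += 1
--         for dr, dc in DIRECTIONS:
--             q = (p[0] + dr, p[1] + dc)
--             if q in alive and degree(q) < 4:
--                 stack.append(q)
--     return removed
-- ===== Notes on version B (the rewrite author's own statement) =====
-- stated objective: alternative
-- what changed: A repeatedly re-sweeps the whole grid until a sweep removes nothing; B builds the coordinate set of '@' cells once and peels it with a worklist stack, re-examining only the up-to-8 neighbours of each removed cell, which is exact because the peeling fixed point (the 4-core) is independent of removal order.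
import Mathlib
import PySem

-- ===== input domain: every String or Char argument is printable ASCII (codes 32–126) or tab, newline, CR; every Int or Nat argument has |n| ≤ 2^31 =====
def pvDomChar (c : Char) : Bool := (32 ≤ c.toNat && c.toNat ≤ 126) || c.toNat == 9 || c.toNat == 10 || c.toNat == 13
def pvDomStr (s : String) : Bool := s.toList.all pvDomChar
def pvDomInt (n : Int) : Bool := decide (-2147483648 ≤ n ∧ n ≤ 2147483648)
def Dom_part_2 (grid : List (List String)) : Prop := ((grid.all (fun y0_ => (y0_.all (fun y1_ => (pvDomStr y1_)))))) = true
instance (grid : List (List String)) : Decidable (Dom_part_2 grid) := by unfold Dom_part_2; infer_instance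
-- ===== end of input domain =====

-- B replaces A's repeated full-grid sweeps by worklist peeling over a coordinate set (objective: alternative).
-- A mutates its argument grid in place (cells set to '.'); B does not — the equivalence proved here is about the return value only.

-- ===== PORT A =====
def pvDirs : List (Int × Int) := [(-1,0),(1,0),(0,-1),(0,1),(-1,-1),(-1,1),(1,-1),(1,1)]

-- len(grid[0]) (0 for the empty grid, where Python never evaluates it)
def pvC (g : List (List String)) : Nat := ((PySem.List.pyGet? g 0).getD []).length

-- grid[r][c]; the getD defaults are unreachable for the in-bounds indices both ports use
def pvCell (g : List (List String)) (r c : Int) : String :=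
  ((PySem.List.pyGet? ((PySem.List.pyGet? g r).getD []) c).getD "")

-- A's inner DIRECTIONS loop computing num_towels
def pvCount (g : List (List String)) (r c : Int) : Int :=
  pvDirs.foldl (fun n d =>
    if 0 ≤ r + d.1 ∧ r + d.1 < (g.length : Int) ∧ 0 ≤ c + d.2 ∧ c + d.2 < ((pvC g : Int)) then
      if pvCell g (r + d.1) (c + d.2) = "@" then n + 1 else n
    else n) 0

-- grid[r][c] = v (in-place in Python; functional update here)
def pvSet (g : List (List String)) (r c : Int) (v : String) : List (List String) :=
  PySem.List.pySetD g r (PySem.List.pySetD ((PySem.List.pyGet? g r).getD []) c v)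

-- the body of A's double scan at one cell; state = (grid, changed, result)
def pvCellStep (s : List (List String) × Bool × Int) (r c : Int) :
    List (List String) × Bool × Int :=
  if pvCell s.1 r c ≠ "@" then s
  else if pvCount s.1 r c < 4 then (pvSet s.1 r c ".", true, s.2.2 + 1)
  else s

-- one full pass of A's two nested for-loops
def pvPass (g : List (List String)) (res : Int) : List (List String) × Bool × Int :=
  (PySem.List.pyRange 0 (g.length : Int) 1).foldl
    (fun s r => (PySem.List.pyRange 0 ((pvC s.1 : Int)) 1).foldl (fun s' c => pvCellStep s' r c) s)
    (g, false, res)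

-- the coordinates of the '@' cells inside the scanned window (used for A's fuel and B's set)
def pvCells (g : List (List String)) : List (Int × Int) :=
  (PySem.List.pyRange 0 (g.length : Int) 1).flatMap (fun r =>
    ((PySem.List.pyRange 0 ((pvC g : Int)) 1).filter (fun c => pvCell g r c = "@")).map (fun c => (r, c)))

-- A's `while True` loop; each repeat removes at least one '@', so #'@'+1 rounds of fuel always suffice
def pvLoop : Nat → List (List String) → Int → Int
  | 0, _, res => res
  | fuel+1, g, res =>
    match pvPass g res with
    | (g', changed, res') => if changed then pvLoop fuel g' res' else res'

def part_2 (grid : List (List String)) : Int :=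
  pvLoop ((pvCells grid).length + 1) grid 0

-- ===== PORT B =====
-- B's degree(p): sum of 1 over directions with the neighbour in `alive`
def pvDeg (alive : List (Int × Int)) (p : Int × Int) : Int :=
  pvDirs.foldl (fun n d => if (p.1 + d.1, p.2 + d.2) ∈ alive then n + 1 else n) 0

-- B's `while stack` loop; Python pop() takes the LAST element. 9*|alive|+|stack| strictly
-- decreases each iteration, so the fuel part_2_alt supplies always suffices.
def pvBLoop : Nat → PySem.Set (Int × Int) → List (Int × Int) → Int → Int
  | 0, _, _, removed => removed
  | fuel+1, alive, stack, removed =>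
    if h : stack = [] then removed
    else
      let p := stack.getLast h
      let rest := stack.dropLast
      if p ∈ alive then
        let alive' := PySem.Set.discard alive p
        let stack' := pvDirs.foldl (fun st d =>
          if (p.1 + d.1, p.2 + d.2) ∈ alive' ∧ pvDeg alive' (p.1 + d.1, p.2 + d.2) < 4
          then st ++ [(p.1 + d.1, p.2 + d.2)] else st) rest
        pvBLoop fuel alive' stack' (removed + 1)
      else pvBLoop fuel alive rest removed

def part_2_alt (grid : List (List String)) : Int :=
  let alive := PySem.Set.ofList (pvCells grid)
  let stack := alive.filter (fun p => pvDeg alive p < 4)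
  pvBLoop (9 * alive.length + stack.length + 1) alive stack 0

-- ===== PRECONDITION & SPEC =====
-- Pre_ excludes exactly the ragged grids on which the Python raises IndexError: a row shorter
-- than row 0 is indexed at a column < len(grid[0]) during the scan.
def Pre_part_2 (grid : List (List String)) : Prop := ∀ row ∈ grid, pvC grid ≤ row.length
instance (grid : List (List String)) : Decidable (Pre_part_2 grid) := by unfold Pre_part_2; infer_instance

def pvWitness_part_2 : List (List String) := [["@","@"],["@","@"]]

def Spec_part_2 (grid : List (List String)) (out : Int) : Prop := out = part_2_alt grid
instance (grid : List (List String)) (out : Int) : Decidable (Spec_part_2 grid out) := by unfold Spec_part_2; infer_instance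

-- ===== CLAIM (what is proved, stated in full; the proofs are below) =====
def Claim_equal_part_2 : Prop := ∀ (grid : List (List String)), Dom_part_2 grid → Pre_part_2 grid → Spec_part_2 grid (part_2 grid)

-- ===== LEMMAS AND PROOFS =====

-- a fold appending at most one element per step
theorem pvFoldlAppendLen {α β : Type} (l : List α) (f : List β → α → List β)
    (h : ∀ st a, (f st a).length ≤ st.length + 1) :
    ∀ st : List β, (l.foldl f st).length ≤ st.length + l.length := by
  induction l with
  | nil => intro st; simp
  | cons a l ih =>
    intro st
    have := ih (f st a)
    have := h st a
    simp only [List.foldl_cons, List.length_cons]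
    omega


-- abstract peeling: sets of coordinates, one removal at a time
def adeg (S : Finset (Int × Int)) (p : Int × Int) : Nat :=
  pvDirs.countP (fun d => decide ((p.1 + d.1, p.2 + d.2) ∈ S))

def AStep (S S' : Finset (Int × Int)) : Prop := ∃ p ∈ S, adeg S p < 4 ∧ S' = S.erase p

def AGood (S : Finset (Int × Int)) : Prop := ∀ p ∈ S, 4 ≤ adeg S p

def AReach : Finset (Int × Int) → Finset (Int × Int) → Prop := Relation.ReflTransGen AStep

def toAbs (g : List (List String)) : Finset (Int × Int) := (pvCells g).toFinset

theorem adeg_mono {S T : Finset (Int × Int)} (h : S ⊆ T) (p : Int × Int) :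
    adeg S p ≤ adeg T p := by
  apply List.countP_mono_left
  intro d _ hd
  simp only [decide_eq_true_eq] at *
  exact h hd

theorem astep_subset {S S' : Finset (Int × Int)} (h : AStep S S') : S' ⊆ S := by
  obtain ⟨p, _, _, rfl⟩ := h; exact Finset.erase_subset _ _

theorem astep_card {S S' : Finset (Int × Int)} (h : AStep S S') : S'.card + 1 = S.card := by
  obtain ⟨p, hp, _, rfl⟩ := h
  rw [Finset.card_erase_of_mem hp]
  have := Finset.card_pos.mpr ⟨p, hp⟩
  omega

theorem areach_subset {S S' : Finset (Int × Int)} (h : AReach S S') : S' ⊆ S := by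
  induction h with
  | refl => exact fun _ h => h
  | tail _ hstep ih => exact fun x hx => ih (astep_subset hstep hx)

theorem agood_sub_step {T S S' : Finset (Int × Int)} (hg : AGood T) (hts : T ⊆ S)
    (h : AStep S S') : T ⊆ S' := by
  obtain ⟨p, hp, hdeg, rfl⟩ := h
  intro x hx
  rw [Finset.mem_erase]
  refine ⟨?_, hts hx⟩
  rintro rfl
  exact absurd (le_trans (hg x hx) (adeg_mono hts x)) (by omega)

theorem agood_sub_reach {T S S' : Finset (Int × Int)} (hg : AGood T) (hts : T ⊆ S)
    (h : AReach S S') : T ⊆ S' := by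
  induction h with
  | refl => exact hts
  | tail _ hstep ih => exact agood_sub_step hg ih hstep

theorem aterminal_unique {S T1 T2 : Finset (Int × Int)} (h1 : AReach S T1) (hg1 : AGood T1)
    (h2 : AReach S T2) (hg2 : AGood T2) : T1 = T2 :=
  Finset.Subset.antisymm (agood_sub_reach hg1 (areach_subset h1) h2)
    (agood_sub_reach hg2 (areach_subset h2) h1)


-- counting folds are countP
theorem foldl_count {α : Type} (l : List α) (P : α → Prop) [DecidablePred P] (n : Int) :
    l.foldl (fun n d => if P d then n + 1 else n) n = n + l.countP (fun d => decide (P d)) := by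
  induction l generalizing n with
  | nil => simp
  | cons a l ih =>
    simp only [List.foldl_cons, List.countP_cons, ih]
    by_cases h : P a <;> simp [h] <;> omega

-- membership in the abstract set
theorem mem_toAbs (g : List (List String)) (p : Int × Int) :
    p ∈ toAbs g ↔ 0 ≤ p.1 ∧ p.1 < (g.length : Int) ∧ 0 ≤ p.2 ∧ p.2 < (pvC g : Int) ∧
      pvCell g p.1 p.2 = "@" := by
  obtain ⟨a, b⟩ := p
  simp only [toAbs, pvCells, List.mem_toFinset, List.mem_flatMap, List.mem_map,
    List.mem_filter, PySem.List.mem_pyRange_one, decide_eq_true_eq]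
  constructor
  · rintro ⟨r, ⟨hr0, hr1⟩, c, ⟨⟨hc0, hc1⟩, hat⟩, h⟩
    obtain ⟨rfl, rfl⟩ := Prod.mk.injEq .. ▸ h
    exact ⟨hr0, hr1, hc0, hc1, hat⟩
  · rintro ⟨h1, h2, h3, h4, h5⟩
    exact ⟨a, ⟨h1, h2⟩, b, ⟨⟨h3, h4⟩, h5⟩, rfl⟩

-- A's num_towels equals the abstract degree
theorem pvCount_eq_adeg (g : List (List String)) (r c : Int) :
    pvCount g r c = (adeg (toAbs g) (r, c) : Int) := by
  unfold pvCount adeg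
  simp only [← ite_and]
  rw [foldl_count pvDirs
    (fun d => (0 ≤ r + d.1 ∧ r + d.1 < (g.length : Int) ∧ 0 ≤ c + d.2 ∧ c + d.2 < ((pvC g : Int))) ∧
      pvCell g (r + d.1) (c + d.2) = "@")]
  simp only [Int.zero_add, Int.natCast_inj]
  apply List.countP_congr
  intro d _
  simp only [decide_eq_true_eq, mem_toAbs, and_assoc]

-- B's degree equals the abstract degree on the set of distinct elements
theorem pvDeg_eq_adeg (alive : List (Int × Int)) (p : Int × Int) :
    pvDeg alive p = (adeg alive.toFinset p : Int) := by
  unfold pvDeg adeg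
  rw [foldl_count pvDirs (fun d => (p.1 + d.1, p.2 + d.2) ∈ alive)]
  simp only [Int.zero_add, List.mem_toFinset]


theorem length_pvSet (g : List (List String)) (r c : Int) (v : String) :
    (pvSet g r c v).length = g.length := by
  unfold pvSet; exact PySem.List.length_pySetD ..

theorem pvC_pvSet (g : List (List String)) (r c : Int) (v : String) (hr : 0 ≤ r) :
    pvC (pvSet g r c v) = pvC g := by
  unfold pvSet pvC
  rw [PySem.List.pySetD_of_nonneg _ _ hr, PySem.List.pyGet?_of_nonneg _ hr]
  rcases Nat.lt_or_ge r.toNat g.length with h | h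
  · rw [PySem.List.pyGet?_zero, PySem.List.pyGet?_zero]
    rcases Nat.eq_zero_or_pos r.toNat with h0 | h0
    · rw [h0, List.getElem?_set_self (h0 ▸ h)]
      cases hg : g[0]? with
      | none => rw [List.getElem?_eq_none_iff] at hg; omega
      | some row => simp [hg, PySem.List.length_pySetD]
    · rw [List.getElem?_set_ne (by omega)]
  · rw [List.set_eq_of_length_le (by omega)]

theorem pvCell_pvSet (g : List (List String)) (r c a b : Int) (v : String)
    (hr : 0 ≤ r) (hrl : r < (g.length : Int)) (hc : 0 ≤ c)
    (hcl : c < ((((PySem.List.pyGet? g r).getD [])).length : Int))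
    (ha : 0 ≤ a) (hb : 0 ≤ b) :
    pvCell (pvSet g r c v) a b = if a = r ∧ b = c then v else pvCell g a b := by
  have hrn : r.toNat < g.length := by omega
  unfold pvSet pvCell
  rw [PySem.List.pyGet?_of_nonneg _ hr] at hcl ⊢
  rw [PySem.List.pySetD_of_nonneg _ _ hr]
  rw [PySem.List.pyGet?_of_nonneg _ ha]
  by_cases har : a = r
  · subst har
    rw [List.getElem?_set_self hrn]
    cases hg : g[a.toNat]? with
    | none => rw [List.getElem?_eq_none_iff] at hg; omega
    | some row =>
      simp only [hg, Option.getD_some] at hcl ⊢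
      have hcn : c.toNat < row.length := by omega
      rw [PySem.List.pySetD_of_nonneg _ _ hc]
      rw [PySem.List.pyGet?_of_nonneg _ hb]
      by_cases hbc : b = c
      · subst hbc
        rw [List.getElem?_set_self (by omega)]
        simp
      · rw [List.getElem?_set_ne (by omega)]
        simp [hbc, PySem.List.pyGet?_of_nonneg _ ha, PySem.List.pyGet?_of_nonneg _ hb, hg]
  · rw [List.getElem?_set_ne (by omega)]
    simp [har, PySem.List.pyGet?_of_nonneg _ ha, PySem.List.pyGet?_of_nonneg _ hb]

theorem pre_pvSet (g : List (List String)) (r c : Int) (v : String) (hr : 0 ≤ r)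
    (hpre : Pre_part_2 g) : Pre_part_2 (pvSet g r c v) := by
  intro row hrow
  rw [pvC_pvSet g r c v hr]
  unfold pvSet at hrow
  rw [PySem.List.pySetD_of_nonneg _ _ hr] at hrow
  cases hg : PySem.List.pyGet? g r with
  | none =>
    have hnin : ¬ PySem.Raise.InRange g.length r := by
      rw [← PySem.List.pyGet?_eq_none_iff]; exact hg
    have hlen : g.length ≤ r.toNat := by
      by_contra hcon
      exact hnin ⟨by omega, by omega⟩
    rw [List.set_eq_of_length_le hlen] at hrow
    exact hpre row hrow
  | some row0 =>
    rcases List.mem_or_eq_of_mem_set hrow with h | h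
    · exact hpre row h
    · subst h
      rw [PySem.List.length_pySetD, hg]
      simpa using hpre row0 (PySem.List.mem_of_pyGet?_eq_some _ hg)

theorem toAbs_pvSet (g : List (List String)) (r c : Int) (hpre : Pre_part_2 g)
    (hmem : (r, c) ∈ toAbs g) :
    toAbs (pvSet g r c ".") = (toAbs g).erase (r, c) := by
  rw [mem_toAbs] at hmem
  obtain ⟨hr, hrl, hc, hcl, hat⟩ := hmem
  have hcl' : c < ((((PySem.List.pyGet? g r).getD [])).length : Int) := by
    cases hg : PySem.List.pyGet? g r with
    | none =>
      rw [PySem.List.pyGet?_eq_none_iff] at hg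
      exact absurd (by constructor <;> omega : PySem.Raise.InRange g.length r) hg
    | some row =>
      have := hpre row (PySem.List.mem_of_pyGet?_eq_some _ hg)
      simp only [hg, Option.getD_some]
      omega
  ext ⟨a, b⟩
  rw [Finset.mem_erase, mem_toAbs, mem_toAbs, length_pvSet, pvC_pvSet g r c _ hr]
  constructor
  · rintro ⟨ha, hal, hb, hbl, hcell⟩
    rw [pvCell_pvSet g r c a b _ hr hrl hc hcl' ha hb] at hcell
    split at hcell
    · simp at hcell
    · rename_i hne
      refine ⟨?_, ha, hal, hb, hbl, hcell⟩
      intro he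
      rw [Prod.mk.injEq] at he
      exact hne ⟨he.1, he.2⟩
  · rintro ⟨hne, ha, hal, hb, hbl, hcell⟩
    refine ⟨ha, hal, hb, hbl, ?_⟩
    rw [pvCell_pvSet g r c a b _ hr hrl hc hcl' ha hb]
    simp only [ne_eq, Prod.mk.injEq, not_and] at hne
    split
    · rename_i he; exact absurd (hne he.1) (by simp [he.2])
    · exact hcell


-- the loop invariant for A's sweeps
def AInv (N0 C0 : Nat) (S0 : Finset (Int × Int)) (s : List (List String) × Bool × Int) : Prop :=
  Pre_part_2 s.1 ∧ s.1.length = N0 ∧ pvC s.1 = C0 ∧ AReach S0 (toAbs s.1) ∧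
  s.2.2 = (S0.card : Int) - ((toAbs s.1).card : Int)

theorem pvCellStep_cases (s : List (List String) × Bool × Int) (r c : Int) :
    pvCellStep s r c = s ∨
    (pvCell s.1 r c = "@" ∧ pvCount s.1 r c < 4 ∧
      pvCellStep s r c = (pvSet s.1 r c ".", true, s.2.2 + 1)) := by
  unfold pvCellStep
  split_ifs with h1 h2
  · exact Or.inl rfl
  · exact Or.inr ⟨by simpa using h1, h2, rfl⟩
  · exact Or.inl rfl

theorem pvCellStep_inv {N0 C0 : Nat} {S0 : Finset (Int × Int)}
    (s : List (List String) × Bool × Int) (r c : Int)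
    (hInv : AInv N0 C0 S0 s) (hr : 0 ≤ r) (hrl : r < (N0 : Int))
    (hc : 0 ≤ c) (hcl : c < (C0 : Int)) :
    AInv N0 C0 S0 (pvCellStep s r c) := by
  rcases pvCellStep_cases s r c with h | ⟨hat, hcnt, h⟩
  · rw [h]; exact hInv
  · obtain ⟨hpre, hlen, hC, hreach, hres⟩ := hInv
    have hmem : (r, c) ∈ toAbs s.1 := by
      rw [mem_toAbs]
      exact ⟨hr, by omega, hc, by omega, hat⟩
    have hstep : AStep (toAbs s.1) (toAbs (pvSet s.1 r c ".")) := by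
      refine ⟨(r, c), hmem, ?_, (toAbs_pvSet s.1 r c hpre hmem).symm ▸ rfl⟩
      have := pvCount_eq_adeg s.1 r c
      omega
    have hcard := astep_card hstep
    rw [h]
    refine ⟨pre_pvSet s.1 r c "." hr hpre, by simpa [length_pvSet] using hlen,
      by simpa [pvC_pvSet s.1 r c "." hr] using hC,
      Relation.ReflTransGen.tail hreach hstep, ?_⟩
    simp only
    omega

-- every cell-step either leaves the state alone or raises the flag and bumps result
def AGen (f : (List (List String) × Bool × Int) → Int → (List (List String) × Bool × Int)) : Prop :=
  ∀ s a, f s a = s ∨ ((f s a).2.1 = true ∧ s.2.2 + 1 ≤ (f s a).2.2)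

theorem agen_flag_mono {f} (hf : AGen f) (s : List (List String) × Bool × Int) (a : Int)
    (h : s.2.1 = true) : (f s a).2.1 = true := by
  rcases hf s a with he | ⟨hb, _⟩
  · rw [he]; exact h
  · exact hb

theorem agen_res_mono {f} (hf : AGen f) (s : List (List String) × Bool × Int) (a : Int) :
    s.2.2 ≤ (f s a).2.2 := by
  rcases hf s a with he | ⟨_, hb⟩
  · rw [he]
  · omega

theorem agen_foldl_flag_mono {f} (hf : AGen f) (l : List Int)
    (t : List (List String) × Bool × Int) (ht : t.2.1 = true) : (l.foldl f t).2.1 = true := by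
  induction l generalizing t with
  | nil => exact ht
  | cons b m ihm => exact ihm _ (agen_flag_mono hf t b ht)

theorem agen_foldl_res_mono {f} (hf : AGen f) (l : List Int)
    (t : List (List String) × Bool × Int) : t.2.2 ≤ (l.foldl f t).2.2 := by
  induction l generalizing t with
  | nil => exact le_refl _
  | cons b m ihm => exact le_trans (agen_res_mono hf t b) (ihm _)

theorem agen_foldl {f} (hf : AGen f) (l : List Int) (s : List (List String) × Bool × Int) :
    l.foldl f s = s ∨ ((l.foldl f s).2.1 = true ∧ s.2.2 + 1 ≤ (l.foldl f s).2.2) := by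
  induction l generalizing s with
  | nil => exact Or.inl rfl
  | cons a l ih =>
    simp only [List.foldl_cons]
    rcases hf s a with he | ⟨hb, hres⟩
    · rw [he]; exact ih s
    · exact Or.inr ⟨agen_foldl_flag_mono hf l _ hb,
        le_trans (by omega) (agen_foldl_res_mono hf l _)⟩

theorem agen_foldl_nochange {f} (hf : AGen f) (l : List Int)
    (s : List (List String) × Bool × Int) (hs : s.2.1 = false)
    (hend : (l.foldl f s).2.1 = false) : l.foldl f s = s ∧ ∀ a ∈ l, f s a = s := by
  induction l with
  | nil => exact ⟨rfl, by simp⟩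
  | cons a l ih =>
    simp only [List.foldl_cons] at hend ⊢
    rcases hf s a with he | ⟨hb, _⟩
    · rw [he] at hend ⊢
      obtain ⟨h1, h2⟩ := ih hend
      exact ⟨h1, by
        intro x hx
        rcases List.mem_cons.mp hx with rfl | hx'
        · exact he
        · exact h2 x hx'⟩
    · rw [agen_foldl_flag_mono hf l _ hb] at hend
      cases hend

theorem agen_cellStep (r : Int) : AGen (fun s c => pvCellStep s r c) := by
  intro s c
  rcases pvCellStep_cases s r c with h | ⟨_, _, h⟩
  · exact Or.inl h
  · right
    refine ⟨?_, ?_⟩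
    · show (pvCellStep s r c).2.1 = true; rw [h]
    · show s.2.2 + 1 ≤ (pvCellStep s r c).2.2; rw [h]

theorem agen_outer : AGen (fun s r =>
    (PySem.List.pyRange 0 ((pvC s.1 : Int)) 1).foldl (fun s' c => pvCellStep s' r c) s) := by
  intro s r
  exact agen_foldl (agen_cellStep r) _ s


theorem inner_foldl_inv {N0 C0 : Nat} {S0 : Finset (Int × Int)} (r : Int)
    (hr : 0 ≤ r) (hrl : r < (N0 : Int)) (cs : List Int)
    (hcs : ∀ c ∈ cs, 0 ≤ c ∧ c < (C0 : Int)) :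
    ∀ s, AInv N0 C0 S0 s → AInv N0 C0 S0 (cs.foldl (fun s' c => pvCellStep s' r c) s) := by
  induction cs with
  | nil => intro s h; exact h
  | cons c cs ih =>
    intro s h
    simp only [List.foldl_cons]
    obtain ⟨hc0, hc1⟩ := hcs c List.mem_cons_self
    exact ih (fun x hx => hcs x (List.mem_cons_of_mem _ hx)) _
      (pvCellStep_inv s r c h hr hrl hc0 hc1)

theorem outer_foldl_inv {N0 C0 : Nat} {S0 : Finset (Int × Int)} (rs : List Int)
    (hrs : ∀ r ∈ rs, 0 ≤ r ∧ r < (N0 : Int)) :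
    ∀ s, AInv N0 C0 S0 s →
      AInv N0 C0 S0 (rs.foldl (fun s r =>
        (PySem.List.pyRange 0 ((pvC s.1 : Int)) 1).foldl (fun s' c => pvCellStep s' r c) s) s) := by
  induction rs with
  | nil => intro s h; exact h
  | cons r rs ih =>
    intro s h
    simp only [List.foldl_cons]
    obtain ⟨hr0, hr1⟩ := hrs r List.mem_cons_self
    refine ih (fun x hx => hrs x (List.mem_cons_of_mem _ hx)) _ ?_
    have hC : pvC s.1 = C0 := h.2.2.1
    rw [hC]
    exact inner_foldl_inv r hr0 hr1 _
      (fun c hc => by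
        rw [PySem.List.mem_pyRange_one] at hc
        exact hc) s h

theorem pvPass_inv {N0 C0 : Nat} {S0 : Finset (Int × Int)} (g : List (List String)) (res : Int)
    (hg : AInv N0 C0 S0 (g, false, res)) (hN : g.length = N0) :
    AInv N0 C0 S0 (pvPass g res) := by
  unfold pvPass
  refine outer_foldl_inv _ ?_ _ hg
  intro r hr
  rw [PySem.List.mem_pyRange_one] at hr
  omega

theorem pvPass_disj (g : List (List String)) (res : Int) :
    pvPass g res = (g, false, res) ∨
    ((pvPass g res).2.1 = true ∧ res + 1 ≤ (pvPass g res).2.2) :=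
  agen_foldl agen_outer _ _

theorem pvPass_nochange (g : List (List String)) (res : Int)
    (h : (pvPass g res).2.1 = false) :
    pvPass g res = (g, false, res) ∧ AGood (toAbs g) := by
  unfold pvPass at h ⊢
  obtain ⟨heq, hrows⟩ := agen_foldl_nochange agen_outer _ (g, false, res) rfl h
  refine ⟨heq, ?_⟩
  rintro ⟨a, b⟩ hp
  rw [mem_toAbs] at hp
  obtain ⟨ha, hal, hb, hbl, hat⟩ := hp
  have hamem : a ∈ PySem.List.pyRange 0 (g.length : Int) 1 := by
    rw [PySem.List.mem_pyRange_one]; exact ⟨ha, hal⟩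
  have hrow := hrows a hamem
  simp only [] at hrow
  obtain ⟨_, hcells⟩ := agen_foldl_nochange (agen_cellStep a) _ (g, false, res) rfl
    (by rw [hrow])
  have hbmem : b ∈ PySem.List.pyRange 0 ((pvC (g, false, res).1 : Int)) 1 := by
    rw [PySem.List.mem_pyRange_one]; exact ⟨hb, hbl⟩
  have hcell := hcells b hbmem
  simp only [] at hcell
  by_contra hlt
  push_neg at hlt
  have hstep : pvCellStep (g, false, res) a b = (pvSet g a b ".", true, res + 1) := by
    unfold pvCellStep
    rw [if_neg (by simp [hat]), if_pos (by rw [pvCount_eq_adeg]; exact_mod_cast hlt)]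
  rw [hstep] at hcell
  exact absurd (congrArg (fun t => t.2.1) hcell) (by simp)

theorem pvLoop_correct {N0 C0 : Nat} {S0 : Finset (Int × Int)} :
    ∀ (fuel : Nat) (g : List (List String)) (res : Int),
      AInv N0 C0 S0 (g, false, res) → (toAbs g).card < fuel →
      ∃ T, AReach S0 T ∧ AGood T ∧ pvLoop fuel g res = (S0.card : Int) - (T.card : Int) := by
  intro fuel
  induction fuel with
  | zero => intro g res _ hcard; omega
  | succ fuel ih =>
    intro g res hInv hcard
    have hN : g.length = N0 := hInv.2.1
    have hInv' := pvPass_inv g res hInv hN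
    rcases hpeq : pvPass g res with ⟨g1, ch, res1⟩
    rw [hpeq] at hInv'
    cases ch with
    | false =>
      obtain ⟨heq, hgood⟩ := pvPass_nochange g res (by rw [hpeq])
      rw [hpeq] at heq
      have hres1 : res1 = res := congrArg (fun t => t.2.2) heq
      refine ⟨toAbs g, hInv.2.2.2.1, hgood, ?_⟩
      rw [pvLoop, hpeq]
      simpa [hres1] using hInv.2.2.2.2
    | true =>
      rcases pvPass_disj g res with heq | ⟨hflag, hres⟩
      · rw [hpeq] at heq; cases heq
      · rw [hpeq] at hflag hres
        simp only [] at hflag hres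
        obtain ⟨hpre1, hlen1, hC1, hreach1, hres1⟩ := hInv'
        have hresg : res = (S0.card : Int) - ((toAbs g).card : Int) := hInv.2.2.2.2
        have hsub : (toAbs g1).card < (toAbs g).card := by
          simp only [] at hres1
          omega
        obtain ⟨T, hT1, hT2, hT3⟩ := ih g1 res1 ⟨hpre1, hlen1, hC1, hreach1, hres1⟩ (by omega)
        refine ⟨T, hT1, hT2, ?_⟩
        rw [pvLoop, hpeq]
        simpa using hT3

theorem partA_correct (g : List (List String)) (hpre : Pre_part_2 g) :
    ∃ T, AReach (toAbs g) T ∧ AGood T ∧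
      part_2 g = (((toAbs g).card : Int)) - (T.card : Int) := by
  unfold part_2
  refine pvLoop_correct _ g 0 ⟨hpre, rfl, rfl, Relation.ReflTransGen.refl, by simp⟩ ?_
  have h1 : (toAbs g).card ≤ (pvCells g).length := List.toFinset_card_le (pvCells g)
  omega


-- B-side: membership in the push-loop's result
theorem mem_foldl_append_if {α β : Type} [DecidableEq α] (l : List β) (P : β → Prop)
    [DecidablePred P] (h : β → α) :
    ∀ (st : List α) (x : α),
      x ∈ l.foldl (fun st d => if P d then st ++ [h d] else st) st ↔
      x ∈ st ∨ ∃ d ∈ l, P d ∧ x = h d := by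
  induction l with
  | nil => simp
  | cons a l ih =>
    intro st x
    simp only [List.foldl_cons]
    by_cases hpa : P a
    · rw [if_pos hpa, ih]
      simp only [List.mem_append, List.mem_singleton, List.mem_cons, List.not_mem_nil, or_false]
      constructor
      · rintro (⟨hx | hx⟩ | ⟨d, hd, hPd, hxd⟩)
        · exact Or.inl hx
        · exact Or.inr ⟨a, Or.inl rfl, hpa, hx⟩
        · exact Or.inr ⟨d, Or.inr hd, hPd, hxd⟩
      · rintro (hx | ⟨d, hd | hd, hPd, hxd⟩)
        · exact Or.inl (Or.inl hx)
        · subst hd; exact Or.inl (Or.inr hxd)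
        · exact Or.inr ⟨d, hd, hPd, hxd⟩
    · rw [if_neg hpa, ih]
      constructor
      · rintro (hx | ⟨d, hd, hPd, hxd⟩)
        · exact Or.inl hx
        · exact Or.inr ⟨d, List.mem_cons_of_mem _ hd, hPd, hxd⟩
      · rintro (hx | ⟨d, hd, hPd, hxd⟩)
        · exact Or.inl hx
        · rcases List.mem_cons.mp hd with rfl | hd'
          · exact absurd hPd hpa
          · exact Or.inr ⟨d, hd', hPd, hxd⟩

theorem pvDirs_neg : ∀ d ∈ pvDirs, (-d.1, -d.2) ∈ pvDirs := by decide

-- if the degree changed when erasing p, then p is one of q's neighbours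
theorem adeg_erase_ne {S : Finset (Int × Int)} {p q : Int × Int}
    (h : adeg (S.erase p) q ≠ adeg S q) :
    ∃ d ∈ pvDirs, (q.1 + d.1, q.2 + d.2) = p := by
  by_contra hno
  push_neg at hno
  apply h
  unfold adeg
  apply List.countP_congr
  intro d hd
  have hiff : ((q.1 + d.1, q.2 + d.2) ∈ S.erase p) ↔ ((q.1 + d.1, q.2 + d.2) ∈ S) := by
    rw [Finset.mem_erase]
    exact ⟨fun h => h.2, fun hm => ⟨hno d hd, hm⟩⟩
  simpa only [decide_eq_true_eq] using hiff

def BInv (S0 : Finset (Int × Int)) (alive stack : List (Int × Int)) (removed : Int) : Prop :=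
  alive.Nodup ∧ AReach S0 alive.toFinset ∧
  removed = (S0.card : Int) - (alive.toFinset.card : Int) ∧
  (∀ p ∈ alive, adeg alive.toFinset p < 4 → p ∈ stack) ∧
  (∀ p ∈ stack, p ∈ alive → adeg alive.toFinset p < 4)

theorem toFinset_discard (alive : List (Int × Int)) (p : Int × Int) :
    (PySem.Set.discard alive p).toFinset = alive.toFinset.erase p := by
  ext q
  rw [List.mem_toFinset, PySem.Set.mem_discard, Finset.mem_erase, List.mem_toFinset, and_comm]

theorem pvBLoop_correct {S0 : Finset (Int × Int)} :
    ∀ (fuel : Nat) (alive stack : List (Int × Int)) (removed : Int),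
      BInv S0 alive stack removed → 9 * alive.length + stack.length < fuel →
      ∃ T, AReach S0 T ∧ AGood T ∧
        pvBLoop fuel alive stack removed = (S0.card : Int) - (T.card : Int) := by
  intro fuel
  induction fuel with
  | zero => intro alive stack removed _ hf; omega
  | succ fuel ih =>
    intro alive stack removed hInv hf
    obtain ⟨hnd, hreach, hrem, hinv4, hinv5⟩ := hInv
    by_cases hstk : stack = []
    · refine ⟨alive.toFinset, hreach, ?_, ?_⟩
      · intro q hq
        rw [List.mem_toFinset] at hq
        by_contra hlt
        have := hinv4 q hq (by omega)
        rw [hstk] at this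
        cases this
      · rw [pvBLoop, dif_pos hstk]
        exact hrem
    · rw [pvBLoop, dif_neg hstk]
      set p := stack.getLast hstk with hp
      have hpstk : p ∈ stack := List.getLast_mem hstk
      have hsplit : stack.dropLast ++ [p] = stack := List.dropLast_append_getLast hstk
      have hlstk : stack.dropLast.length + 1 = stack.length := by
        rw [← hsplit]; simp
      by_cases hpa : p ∈ alive
      · rw [if_pos hpa]
        have hdeg : adeg alive.toFinset p < 4 := hinv5 p hpstk hpa
        have hpf : p ∈ alive.toFinset := List.mem_toFinset.mpr hpa
        have htf : (PySem.Set.discard alive p).toFinset = alive.toFinset.erase p :=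
          toFinset_discard alive p
        have hstep : AStep alive.toFinset (PySem.Set.discard alive p).toFinset :=
          ⟨p, hpf, hdeg, htf⟩
        have hnd' : (PySem.Set.discard alive p).Nodup := PySem.Set.nodup_discard alive p hnd
        have hcard : (PySem.Set.discard alive p).toFinset.card + 1 = alive.toFinset.card := by
          rw [htf, Finset.card_erase_of_mem hpf]
          have := Finset.card_pos.mpr ⟨p, hpf⟩
          omega
        have hlen' : (PySem.Set.discard alive p).length + 1 = alive.length := by
          have h1 := List.toFinset_card_of_nodup hnd'
          have h2 := List.toFinset_card_of_nodup hnd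
          omega
        set alive' := PySem.Set.discard alive p with halive'
        set stack' := pvDirs.foldl (fun st d =>
          if (p.1 + d.1, p.2 + d.2) ∈ alive' ∧ pvDeg alive' (p.1 + d.1, p.2 + d.2) < 4
          then st ++ [(p.1 + d.1, p.2 + d.2)] else st) stack.dropLast with hstack'
        have hmemstack' : ∀ x, x ∈ stack' ↔ x ∈ stack.dropLast ∨
            ∃ d ∈ pvDirs, ((p.1 + d.1, p.2 + d.2) ∈ alive' ∧
              pvDeg alive' (p.1 + d.1, p.2 + d.2) < 4) ∧ x = (p.1 + d.1, p.2 + d.2) :=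
          fun x => mem_foldl_append_if pvDirs _ _ _ x
        have hslen : stack'.length ≤ stack.dropLast.length + 8 := by
          rw [hstack']
          have := pvFoldlAppendLen pvDirs
            (fun st d =>
              if (p.1 + d.1, p.2 + d.2) ∈ alive' ∧ pvDeg alive' (p.1 + d.1, p.2 + d.2) < 4
              then st ++ [(p.1 + d.1, p.2 + d.2)] else st)
            (fun st d => by dsimp only; split_ifs <;> simp) stack.dropLast
          have h8 : pvDirs.length = 8 := rfl
          omega
        have hsub' : alive'.toFinset ⊆ alive.toFinset := by
          rw [htf]; exact Finset.erase_subset ..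
        refine ih alive' stack' (removed + 1)
          ⟨hnd', Relation.ReflTransGen.tail hreach hstep, by omega, ?_, ?_⟩ (by omega)
        · intro q hq hdq
          have hqa : q ∈ alive := ((PySem.Set.mem_discard alive p q).mp hq).1
          have hqp : q ≠ p := ((PySem.Set.mem_discard alive p q).mp hq).2
          rw [hmemstack' q]
          by_cases hold : adeg alive.toFinset q < 4
          · have hqs := hinv4 q hqa hold
            rw [← hsplit] at hqs
            rcases List.mem_append.mp hqs with h | h
            · exact Or.inl h
            · rw [List.mem_singleton] at h
              exact absurd h hqp
          · have hne' : adeg (alive.toFinset.erase p) q ≠ adeg alive.toFinset q := by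
              rw [← htf]; omega
            obtain ⟨d, hd, hdp⟩ := adeg_erase_ne hne'
            have hq1 : p.1 + -d.1 = q.1 := by
              have := congrArg Prod.fst hdp; simp only [] at this; omega
            have hq2 : p.2 + -d.2 = q.2 := by
              have := congrArg Prod.snd hdp; simp only [] at this; omega
            have hqe : (p.1 + -d.1, p.2 + -d.2) = q := by
              rw [hq1, hq2]
            right
            refine ⟨(-d.1, -d.2), pvDirs_neg d hd, ⟨?_, ?_⟩, ?_⟩
            · show (p.1 + -d.1, p.2 + -d.2) ∈ alive'
              rw [hqe]; exact hq
            · show pvDeg alive' (p.1 + -d.1, p.2 + -d.2) < 4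
              rw [hqe, pvDeg_eq_adeg]
              exact_mod_cast hdq
            · exact hqe.symm
        · intro q hq hqa'
          rw [hmemstack' q] at hq
          rcases hq with hq | ⟨d, hd, ⟨hmem, hdeg⟩, hx⟩
          · have hqs : q ∈ stack := by
              rw [← hsplit]; exact List.mem_append_left _ hq
            have hqa : q ∈ alive := ((PySem.Set.mem_discard alive p q).mp hqa').1
            have h5 := hinv5 q hqs hqa
            have := adeg_mono hsub' q
            omega
          · subst hx
            rw [pvDeg_eq_adeg] at hdeg
            exact_mod_cast hdeg
      · rw [if_neg hpa]
        refine ih alive stack.dropLast removed ⟨hnd, hreach, hrem, ?_, ?_⟩ (by omega)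
        · intro q hq hdq
          have := hinv4 q hq hdq
          rw [← hsplit] at this
          rcases List.mem_append.mp this with h | h
          · exact h
          · rw [List.mem_singleton] at h
            subst h
            exact absurd hq hpa
        · intro q hq hqa
          exact hinv5 q (by rw [← hsplit]; exact List.mem_append_left _ hq) hqa


theorem ofList_toFinset (l : List (Int × Int)) :
    (PySem.Set.ofList l).toFinset = l.toFinset := by
  ext q
  rw [List.mem_toFinset, PySem.Set.mem_ofList, List.mem_toFinset]

theorem partB_correct (g : List (List String)) :
    ∃ T, AReach (toAbs g) T ∧ AGood T ∧
      part_2_alt g = ((toAbs g).card : Int) - (T.card : Int) := by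
  have hAF : (PySem.Set.ofList (pvCells g)).toFinset = toAbs g := ofList_toFinset _
  have hinv : BInv (toAbs g) (PySem.Set.ofList (pvCells g))
      ((PySem.Set.ofList (pvCells g)).filter
        (fun p => pvDeg (PySem.Set.ofList (pvCells g)) p < 4)) 0 := by
    refine ⟨PySem.Set.nodup_ofList _, ?_, ?_, ?_, ?_⟩
    · rw [hAF]; exact Relation.ReflTransGen.refl
    · rw [hAF]; simp
    · intro p hp hdp
      refine List.mem_filter.mpr ⟨hp, ?_⟩
      simp only [decide_eq_true_eq, pvDeg_eq_adeg]
      exact_mod_cast hdp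
    · intro p hp _
      have := (List.mem_filter.mp hp).2
      simp only [decide_eq_true_eq, pvDeg_eq_adeg] at this
      exact_mod_cast this
  obtain ⟨T, h1, h2, h3⟩ := pvBLoop_correct
    (9 * (PySem.Set.ofList (pvCells g)).length +
      ((PySem.Set.ofList (pvCells g)).filter
        (fun p => pvDeg (PySem.Set.ofList (pvCells g)) p < 4)).length + 1)
    (PySem.Set.ofList (pvCells g))
    ((PySem.Set.ofList (pvCells g)).filter
      (fun p => pvDeg (PySem.Set.ofList (pvCells g)) p < 4)) 0 hinv (by omega)
  exact ⟨T, h1, h2, h3⟩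

-- ===== VERDICT (by name: the statement is the Claim_ definition above) =====
theorem part_2_spec : Claim_equal_part_2 := by
  intro g _ hpre
  obtain ⟨T, hr1, hg1, he1⟩ := partA_correct g hpre
  obtain ⟨T', hr2, hg2, he2⟩ := partB_correct g
  show part_2 g = part_2_alt g
  rw [he1, he2, aterminal_unique hr1 hg1 hr2 hg2]
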